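-- pv_equiv track=rewrite | github.com/d0k3n/isla_ia_2026_tp1 | entrega/comparar_algoritmos_distancia_final.py | procura_profundidade
-- ===== SOURCE A (Python) =====
-- def procura_profundidade(grafo, inicial, destino):
--     visitados = set()
--     caminho = []
--     nos_expandidos = []
--
--     def dfs(no):
--         if no in visitados:
--             return False
--         visitados.add(no)
--         caminho.append(no)
--         nos_expandidos.append(no)
--         if no == destino:
--             return True
--         for vizinho in grafo.get(no, []):
--             if dfs(vizinho[0]):
--                 return True
--         caminho.pop()
--         return False
--
--     dfs(inicial)
--     return caminho, nos_expandidos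
-- ===== SOURCE B (Python) =====
-- def procura_profundidade(grafo, inicial, destino):
--     visitados = set()
--     nos_expandidos = []
--     caminho = []
--     stack = [(inicial, [inicial])]
--     while stack:
--         no, path = stack.pop()
--         if no in visitados:
--             continue
--         visitados.add(no)
--         nos_expandidos.append(no)
--         if no == destino:
--             caminho = path
--             break
--         for vizinho in reversed(grafo.get(no, [])):
--             stack.append((vizinho[0], path + [vizinho[0]]))
--     return caminho, nos_expandidos
-- ===== Notes on version B (the rewrite author's own statement) =====
-- stated objective: alternative
-- what changed: Replaced the nested recursive DFS (which mutates a shared caminho list with append/pop backtracking and returns a bool) by an iterative DFS with an explicit stack of (node, path) pairs, a mark-on-pop visited set, and reversed neighbour pushes, reconstructing nothing: the found path travels on the stack.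
import Mathlib
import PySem

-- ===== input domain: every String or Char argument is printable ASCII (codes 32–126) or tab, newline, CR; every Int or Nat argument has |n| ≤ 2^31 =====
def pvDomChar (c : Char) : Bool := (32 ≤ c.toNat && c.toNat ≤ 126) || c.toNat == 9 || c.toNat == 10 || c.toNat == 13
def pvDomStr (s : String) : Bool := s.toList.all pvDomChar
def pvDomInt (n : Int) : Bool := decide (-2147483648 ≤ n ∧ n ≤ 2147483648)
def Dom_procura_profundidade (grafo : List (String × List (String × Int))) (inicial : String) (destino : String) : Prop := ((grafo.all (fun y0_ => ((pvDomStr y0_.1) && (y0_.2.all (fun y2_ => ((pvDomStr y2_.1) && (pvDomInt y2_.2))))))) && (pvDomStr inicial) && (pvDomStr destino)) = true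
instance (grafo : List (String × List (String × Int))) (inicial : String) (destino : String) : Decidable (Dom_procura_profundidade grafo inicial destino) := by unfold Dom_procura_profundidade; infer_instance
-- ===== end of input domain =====

-- B replaces A's recursive backtracking DFS (nested dfs mutating caminho with append/pop) by an
-- iterative explicit-stack DFS over (node, path) pairs: a different decomposition, same return value.

-- grafo.get(no, []) — first-match association-list lookup (used by both Pythons)
def pvAdj (grafo : List (String × List (String × Int))) (no : String) : List (String × Int) :=
  (PySem.Dict.mk grafo).getD no []

-- all node names that can ever be visited (inicial and every neighbour); only used to size the fuel guards
def pvAllNodes (grafo : List (String × List (String × Int))) (inicial : String) : List String :=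
  inicial :: grafo.flatMap (fun p => p.2.map Prod.fst)

-- ===== PORT A =====
-- literal port of the nested recursive dfs; fuel bounds only the recursion depth
-- (proved sufficient below: depth never exceeds the number of distinct visitable nodes + 1)
mutual
def dfsA (grafo : List (String × List (String × Int))) (destino : String)
    (f : Nat) (vis : PySem.Set String) (cam exp : List String) (no : String) :
    Option (Bool × PySem.Set String × List String × List String) :=
  match f with
  | 0 => none
  | f + 1 =>
    if PySem.Set.contains vis no then some (false, vis, cam, exp)
    else
      let vis1 := PySem.Set.add vis no
      let cam1 := cam ++ [no]          -- caminho.append(no)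
      let exp1 := exp ++ [no]          -- nos_expandidos.append(no)
      if no = destino then some (true, vis1, cam1, exp1)
      else
        match dfsALoop grafo destino f vis1 cam1 exp1 (pvAdj grafo no) with
        | none => none
        | some (true, vis2, cam2, exp2) => some (true, vis2, cam2, exp2)
        | some (false, vis2, cam2, exp2) => some (false, vis2, cam2.dropLast, exp2)   -- caminho.pop()
termination_by (f, 0)

def dfsALoop (grafo : List (String × List (String × Int))) (destino : String)
    (f : Nat) (vis : PySem.Set String) (cam exp : List String) (ns : List (String × Int)) :
    Option (Bool × PySem.Set String × List String × List String) :=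
  match ns with
  | [] => some (false, vis, cam, exp)
  | v :: rest =>
    match dfsA grafo destino f vis cam exp v.1 with
    | none => none
    | some (true, vis2, cam2, exp2) => some (true, vis2, cam2, exp2)
    | some (false, vis2, cam2, exp2) => dfsALoop grafo destino f vis2 cam2 exp2 rest
termination_by (f, ns.length + 1)
end

def procura_profundidade (grafo : List (String × List (String × Int))) (inicial : String) (destino : String) : List String × List String :=
  match dfsA grafo destino ((pvAllNodes grafo inicial).length + 1) (PySem.Set.empty) [] [] inicial with
  | some (_, _, cam, exp) => (cam, exp)
  | none => ([], [])   -- unreachable: the fuel is proved sufficient (dfsA_suff below)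

-- ===== PORT B =====
-- literal port of Source B: iterative DFS, explicit stack of (node, path) pairs (list head = top of stack);
-- fuel bounds only the number of loop iterations (the guard is proved large enough via the bridge lemmas)
def pvAdjSum (grafo : List (String × List (String × Int))) : Nat :=
  (grafo.map (fun p => p.2.length)).sum

def runB (grafo : List (String × List (String × Int))) (destino : String)
    (f : Nat) (stack : List (String × List String)) (vis : PySem.Set String) (exp : List String) :
    Option (List String × List String) :=
  match f, stack with
  | 0, _ => none
  | _ + 1, [] => some ([], exp)
  | f + 1, (no, path) :: stack =>
    if PySem.Set.contains vis no then runB grafo destino f stack vis exp   -- continue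
    else
      let vis1 := PySem.Set.add vis no
      let exp1 := exp ++ [no]
      if no = destino then some (path, exp1)                               -- caminho = path; break
      else
        runB grafo destino f
          (((pvAdj grafo no).reverse).foldl (fun s v => (v.1, path ++ [v.1]) :: s) stack)
          vis1 exp1

def procura_profundidade_alt (grafo : List (String × List (String × Int))) (inicial : String) (destino : String) : List String × List String :=
  match runB grafo destino ((pvAdjSum grafo + 1) ^ ((pvAllNodes grafo inicial).length + 1) + 1)
      [(inicial, [inicial])] (PySem.Set.empty) [] with
  | some r => r
  | none => ([], [])   -- unreachable: the fuel is proved sufficient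

-- ===== PRECONDITION & SPEC =====
def Spec_procura_profundidade (grafo : List (String × List (String × Int))) (inicial : String) (destino : String) (out : List String × List String) : Prop := out = procura_profundidade_alt grafo inicial destino
instance (grafo : List (String × List (String × Int))) (inicial : String) (destino : String) (out : List String × List String) : Decidable (Spec_procura_profundidade grafo inicial destino out) := by unfold Spec_procura_profundidade; infer_instance

-- ===== CLAIM (what is proved, stated in full; the proofs are below) =====
def Claim_equal_procura_profundidade : Prop := ∀ (grafo : List (String × List (String × Int))) (inicial : String) (destino : String), Dom_procura_profundidade grafo inicial destino → Spec_procura_profundidade grafo inicial destino (procura_profundidade grafo inicial destino)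

-- ===== LEMMAS AND PROOFS =====

-- number of still-unvisited visitable nodes (the decreasing measure behind both fuels)
def pvCount (allN : List String) (vis : PySem.Set String) : Nat :=
  (allN.filter (fun n => !PySem.Set.contains vis n)).length

lemma pv_contains_iff (s : PySem.Set String) (x : String) :
    PySem.Set.contains s x = true ↔ x ∈ s := by
  simp [PySem.Set.contains]

lemma pv_contains_add (s : PySem.Set String) (x y : String) :
    PySem.Set.contains (PySem.Set.add s x) y = true ↔ (PySem.Set.contains s y = true ∨ y = x) := by
  simp [PySem.Set.mem_add]

lemma pvCount_mono (allN : List String) (vis vis' : PySem.Set String)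
    (h : ∀ x, PySem.Set.contains vis x = true → PySem.Set.contains vis' x = true) :
    pvCount allN vis' ≤ pvCount allN vis := by
  apply List.Sublist.length_le
  apply List.monotone_filter_right
  intro a ha
  cases hvc : PySem.Set.contains vis a with
  | false => rfl
  | true =>
    have hv' := h a hvc
    exact absurd ((pv_contains_iff _ _).1 hv') (by simpa using ha) |> False.elim

lemma pvCount_add_lt (allN : List String) (vis : PySem.Set String) (no : String)
    (hmem : no ∈ allN) (hno : ¬ PySem.Set.contains vis no = true) :
    pvCount allN (PySem.Set.add vis no) < pvCount allN vis := by
  have hs : List.Sublist (allN.filter (fun n => !PySem.Set.contains (PySem.Set.add vis no) n))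
      (allN.filter (fun n => !PySem.Set.contains vis n)) := by
    apply List.monotone_filter_right
    intro a ha
    cases hvc : PySem.Set.contains vis a with
    | false => rfl
    | true =>
      have hc2 : PySem.Set.contains (PySem.Set.add vis no) a = true := (pv_contains_add _ _ _).2 (Or.inl hvc)
      exact absurd ((pv_contains_iff _ _).1 hc2) (by simpa using ha) |> False.elim
  rcases Nat.lt_or_ge (pvCount allN (PySem.Set.add vis no)) (pvCount allN vis) with h | h
  · exact h
  · exfalso
    have hlen : (allN.filter (fun n => !PySem.Set.contains (PySem.Set.add vis no) n)).length
        = (allN.filter (fun n => !PySem.Set.contains vis n)).length :=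
      Nat.le_antisymm hs.length_le h
    have heq := hs.eq_of_length hlen
    have hnomem : no ∉ vis := fun hm => hno ((pv_contains_iff _ _).2 hm)
    have hin : no ∈ allN.filter (fun n => !PySem.Set.contains vis n) := by
      simp [List.mem_filter, hmem, hnomem]
    rw [← heq] at hin
    have hfin := (List.mem_filter.1 hin).2
    simp at hfin
lemma pvAdj_cons (p : String × List (String × Int)) (rest : List (String × List (String × Int))) (no : String) :
    pvAdj (p :: rest) no = if p.1 == no then p.2 else pvAdj rest no := by
  obtain ⟨k, vv⟩ := p
  simp only [pvAdj, PySem.Dict.getD, PySem.Dict.get?_mk_cons]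
  split <;> rfl

lemma pvAdj_nil (no : String) : pvAdj [] no = [] := rfl

lemma pvAdj_len (grafo : List (String × List (String × Int))) (no : String) :
    (pvAdj grafo no).length ≤ pvAdjSum grafo := by
  induction grafo with
  | nil => simp [pvAdj_nil, pvAdjSum]
  | cons p rest ih =>
    rw [pvAdj_cons]
    have : pvAdjSum (p :: rest) = p.2.length + pvAdjSum rest := by simp [pvAdjSum]
    rw [this]
    split
    · omega
    · omega

lemma pvAdj_mem (grafo : List (String × List (String × Int))) (inicial no : String)
    (v : String × Int) (hv : v ∈ pvAdj grafo no) : v.1 ∈ pvAllNodes grafo inicial := by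
  have : v.1 ∈ grafo.flatMap (fun p => p.2.map Prod.fst) := by
    induction grafo with
    | nil => simp [pvAdj_nil] at hv
    | cons p rest ih =>
      rw [pvAdj_cons] at hv
      simp only [List.flatMap_cons, List.mem_append]
      by_cases hp : (p.1 == no) = true
      · rw [if_pos hp] at hv
        exact Or.inl (List.mem_map.2 ⟨v, hv, rfl⟩)
      · rw [if_neg hp] at hv
        exact Or.inr (ih hv)
  exact List.mem_cons_of_mem _ this

lemma pv_revpush_aux {α β : Type} (g : α → β) : ∀ (m : List α) (s : List β),
    m.foldl (fun s v => g v :: s) s = (m.map g).reverse ++ s := by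
  intro m
  induction m with
  | nil => intro s; rfl
  | cons a m ih => intro s; simp [List.foldl_cons, ih, List.map_cons]

lemma pv_revpush (l : List (String × Int)) (path : List String) (s : List (String × List String)) :
    (l.reverse).foldl (fun s v => (v.1, path ++ [v.1]) :: s) s
      = l.map (fun v => (v.1, path ++ [v.1])) ++ s := by
  rw [pv_revpush_aux]
  simp


-- equation lemmas for the fueled ports
lemma dfsA_zero (grafo : List (String × List (String × Int))) (destino : String)
    (vis : PySem.Set String) (cam exp : List String) (no : String) :
    dfsA grafo destino 0 vis cam exp no = none := by rw [dfsA]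

lemma dfsA_succ (grafo : List (String × List (String × Int))) (destino : String)
    (f : Nat) (vis : PySem.Set String) (cam exp : List String) (no : String) :
    dfsA grafo destino (f + 1) vis cam exp no =
      (if PySem.Set.contains vis no then some (false, vis, cam, exp)
      else if no = destino then some (true, PySem.Set.add vis no, cam ++ [no], exp ++ [no])
      else
        match dfsALoop grafo destino f (PySem.Set.add vis no) (cam ++ [no]) (exp ++ [no]) (pvAdj grafo no) with
        | none => none
        | some (true, vis2, cam2, exp2) => some (true, vis2, cam2, exp2)
        | some (false, vis2, cam2, exp2) => some (false, vis2, cam2.dropLast, exp2)) := by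
  rw [dfsA]

lemma dfsALoop_nil (grafo : List (String × List (String × Int))) (destino : String)
    (f : Nat) (vis : PySem.Set String) (cam exp : List String) :
    dfsALoop grafo destino f vis cam exp [] = some (false, vis, cam, exp) := by rw [dfsALoop]

lemma dfsALoop_cons (grafo : List (String × List (String × Int))) (destino : String)
    (f : Nat) (vis : PySem.Set String) (cam exp : List String) (v : String × Int) (rest : List (String × Int)) :
    dfsALoop grafo destino f vis cam exp (v :: rest) =
      (match dfsA grafo destino f vis cam exp v.1 with
      | none => none
      | some (true, vis2, cam2, exp2) => some (true, vis2, cam2, exp2)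
      | some (false, vis2, cam2, exp2) => dfsALoop grafo destino f vis2 cam2 exp2 rest) := by
  rw [dfsALoop]

lemma runB_nil (grafo : List (String × List (String × Int))) (destino : String)
    (f : Nat) (vis : PySem.Set String) (exp : List String) :
    runB grafo destino (f + 1) [] vis exp = some ([], exp) := by rw [runB]

lemma runB_cons (grafo : List (String × List (String × Int))) (destino : String)
    (f : Nat) (no : String) (path : List String) (stack : List (String × List String))
    (vis : PySem.Set String) (exp : List String) :
    runB grafo destino (f + 1) ((no, path) :: stack) vis exp =
      (if PySem.Set.contains vis no then runB grafo destino f stack vis exp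
      else if no = destino then some (path, exp ++ [no])
      else runB grafo destino f
        ((pvAdj grafo no).map (fun v => (v.1, path ++ [v.1])) ++ stack)
        (PySem.Set.add vis no) (exp ++ [no])) := by
  rw [runB, pv_revpush]

-- on failure the recursive dfs restores caminho
lemma pv_restore (grafo : List (String × List (String × Int))) (destino : String) : ∀ f : Nat,
    (∀ vis cam exp no vis' cam' exp',
      dfsA grafo destino f vis cam exp no = some (false, vis', cam', exp') → cam' = cam)
    ∧ (∀ ns vis cam exp vis' cam' exp',
      dfsALoop grafo destino f vis cam exp ns = some (false, vis', cam', exp') → cam' = cam) := by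
  intro f
  induction f with
  | zero =>
    constructor
    · intro vis cam exp no vis' cam' exp' h
      rw [dfsA_zero] at h; cases h
    · intro ns
      cases ns with
      | nil =>
        intro vis cam exp vis' cam' exp' h
        rw [dfsALoop_nil] at h
        simp only [Option.some.injEq, Prod.mk.injEq] at h
        exact h.2.2.1.symm
      | cons v rest =>
        intro vis cam exp vis' cam' exp' h
        rw [dfsALoop_cons, dfsA_zero] at h
        cases h
  | succ f ih =>
    have hnode : ∀ vis cam exp no vis' cam' exp',
        dfsA grafo destino (f + 1) vis cam exp no = some (false, vis', cam', exp') → cam' = cam := by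
      intro vis cam exp no vis' cam' exp' h
      rw [dfsA_succ] at h
      split at h
      · simp only [Option.some.injEq, Prod.mk.injEq] at h
        exact h.2.2.1.symm
      · split at h
        · simp at h
        · cases hl : dfsALoop grafo destino f (PySem.Set.add vis no) (cam ++ [no]) (exp ++ [no]) (pvAdj grafo no) with
          | none => rw [hl] at h; cases h
          | some out =>
            obtain ⟨b2, vis2, cam2, exp2⟩ := out
            rw [hl] at h
            cases b2
            · simp only [Option.some.injEq, Prod.mk.injEq] at h
              have hc2 : cam2 = cam ++ [no] := ih.2 _ _ _ _ _ _ _ hl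
              rw [← h.2.2.1, hc2, List.dropLast_concat]
            · simp at h
    refine ⟨hnode, ?_⟩
    intro ns
    induction ns with
    | nil =>
      intro vis cam exp vis' cam' exp' h
      rw [dfsALoop_nil] at h
      simp only [Option.some.injEq, Prod.mk.injEq] at h
      exact h.2.2.1.symm
    | cons v rest ihr =>
      intro vis cam exp vis' cam' exp' h
      rw [dfsALoop_cons] at h
      cases hd : dfsA grafo destino (f + 1) vis cam exp v.1 with
      | none => rw [hd] at h; cases h
      | some out =>
        obtain ⟨b0, vis0, cam0, exp0⟩ := out
        rw [hd] at h
        cases b0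
        · exact (ihr _ _ _ _ _ _ h).trans (hnode _ _ _ _ _ _ _ hd)
        · simp at h

-- the fuel of port A is sufficient, and visited only grows
lemma pv_suff (grafo : List (String × List (String × Int))) (destino inicial : String) : ∀ f : Nat,
    (∀ vis cam exp no, no ∈ pvAllNodes grafo inicial → pvCount (pvAllNodes grafo inicial) vis < f →
      ∃ b vis' cam' exp', dfsA grafo destino f vis cam exp no = some (b, vis', cam', exp')
        ∧ (∀ x, PySem.Set.contains vis x = true → PySem.Set.contains vis' x = true))
    ∧ (∀ ns vis cam exp, (∀ v ∈ ns, v.1 ∈ pvAllNodes grafo inicial) →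
        pvCount (pvAllNodes grafo inicial) vis < f →
      ∃ b vis' cam' exp', dfsALoop grafo destino f vis cam exp ns = some (b, vis', cam', exp')
        ∧ (∀ x, PySem.Set.contains vis x = true → PySem.Set.contains vis' x = true)) := by
  intro f
  induction f with
  | zero =>
    constructor
    · intro vis cam exp no _ hcnt; omega
    · intro ns vis cam exp _ hcnt; omega
  | succ f ih =>
    have hnode : ∀ vis cam exp no, no ∈ pvAllNodes grafo inicial →
        pvCount (pvAllNodes grafo inicial) vis < f + 1 →
        ∃ b vis' cam' exp', dfsA grafo destino (f + 1) vis cam exp no = some (b, vis', cam', exp')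
          ∧ (∀ x, PySem.Set.contains vis x = true → PySem.Set.contains vis' x = true) := by
      intro vis cam exp no hmem hcnt
      rw [dfsA_succ]
      by_cases hc : PySem.Set.contains vis no = true
      · rw [if_pos hc]
        exact ⟨false, vis, cam, exp, rfl, fun x hx => hx⟩
      · rw [if_neg hc]
        have hgrow1 : ∀ x, PySem.Set.contains vis x = true →
            PySem.Set.contains (PySem.Set.add vis no) x = true :=
          fun x hx => (pv_contains_add _ _ _).2 (Or.inl hx)
        by_cases hd : no = destino
        · rw [if_pos hd]
          exact ⟨true, _, _, _, rfl, hgrow1⟩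
        · rw [if_neg hd]
          have hcnt1 : pvCount (pvAllNodes grafo inicial) (PySem.Set.add vis no) < f := by
            have := pvCount_add_lt (pvAllNodes grafo inicial) vis no hmem hc
            omega
          obtain ⟨b2, vis2, cam2, exp2, hl, hg2⟩ :=
            ih.2 (pvAdj grafo no) (PySem.Set.add vis no) (cam ++ [no]) (exp ++ [no])
              (fun v hv => pvAdj_mem grafo inicial no v hv) hcnt1
          rw [hl]
          cases b2
          · exact ⟨false, vis2, cam2.dropLast, exp2, rfl, fun x hx => hg2 x (hgrow1 x hx)⟩
          · exact ⟨true, vis2, cam2, exp2, rfl, fun x hx => hg2 x (hgrow1 x hx)⟩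
    refine ⟨hnode, ?_⟩
    intro ns
    induction ns with
    | nil =>
      intro vis cam exp _ _
      exact ⟨false, vis, cam, exp, dfsALoop_nil _ _ _ _ _ _, fun x hx => hx⟩
    | cons v rest ihr =>
      intro vis cam exp hmem hcnt
      obtain ⟨b0, vis0, cam0, exp0, h0, hg0⟩ :=
        hnode vis cam exp v.1 (hmem v (List.mem_cons_self)) hcnt
      rw [dfsALoop_cons, h0]
      cases b0
      · have hcnt0 : pvCount (pvAllNodes grafo inicial) vis0 < f + 1 := by
          have := pvCount_mono (pvAllNodes grafo inicial) vis vis0 hg0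
          omega
        obtain ⟨b1, vis1, cam1, exp1, h1, hg1⟩ :=
          ihr vis0 cam0 exp0 (fun w hw => hmem w (List.mem_cons_of_mem _ hw)) hcnt0
        exact ⟨b1, vis1, cam1, exp1, h1, fun x hx => hg1 x (hg0 x hx)⟩
      · exact ⟨true, vis0, cam0, exp0, rfl, hg0⟩

-- THE BRIDGE: a successful/failed recursive dfs call is simulated exactly by the stack machine
lemma pv_bridge (grafo : List (String × List (String × Int))) (destino : String) : ∀ f : Nat,
    (∀ vis cam exp no b vis' cam' exp',
      dfsA grafo destino f vis cam exp no = some (b, vis', cam', exp') →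
      ∀ rest g,
        (b = true → runB grafo destino ((pvAdjSum grafo + 1) ^ f + g) ((no, cam ++ [no]) :: rest) vis exp = some (cam', exp'))
        ∧ (b = false → ∃ k, g ≤ k ∧
            runB grafo destino ((pvAdjSum grafo + 1) ^ f + g) ((no, cam ++ [no]) :: rest) vis exp
              = runB grafo destino k rest vis' exp'))
    ∧ (∀ ns vis cam exp b vis' cam' exp',
      dfsALoop grafo destino f vis cam exp ns = some (b, vis', cam', exp') →
      ∀ rest g,
        (b = true → runB grafo destino (ns.length * (pvAdjSum grafo + 1) ^ f + g) (ns.map (fun v => (v.1, cam ++ [v.1])) ++ rest) vis exp = some (cam', exp'))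
        ∧ (b = false → ∃ k, g ≤ k ∧
            runB grafo destino (ns.length * (pvAdjSum grafo + 1) ^ f + g) (ns.map (fun v => (v.1, cam ++ [v.1])) ++ rest) vis exp
              = runB grafo destino k rest vis' exp')) := by
  intro f
  induction f with
  | zero =>
    constructor
    · intro vis cam exp no b vis' cam' exp' h
      rw [dfsA_zero] at h; cases h
    · intro ns vis cam exp b vis' cam' exp' h rest g
      cases ns with
      | nil =>
        rw [dfsALoop_nil] at h
        simp only [Option.some.injEq, Prod.mk.injEq] at h
        obtain ⟨hb, hv, hcam, hexp⟩ := h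
        constructor
        · intro hbt; rw [← hb] at hbt; cases hbt
        · intro _
          refine ⟨g, le_refl g, ?_⟩
          simp [hv, hexp]
      | cons v restNs =>
        rw [dfsALoop_cons, dfsA_zero] at h; cases h
  | succ f ih =>
    have hCpos : 1 ≤ (pvAdjSum grafo + 1) ^ (f + 1) := Nat.one_le_pow _ _ (by omega)
    have hnode : ∀ vis cam exp no b vis' cam' exp',
        dfsA grafo destino (f + 1) vis cam exp no = some (b, vis', cam', exp') →
        ∀ rest g,
          (b = true → runB grafo destino ((pvAdjSum grafo + 1) ^ (f + 1) + g) ((no, cam ++ [no]) :: rest) vis exp = some (cam', exp'))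
          ∧ (b = false → ∃ k, g ≤ k ∧
              runB grafo destino ((pvAdjSum grafo + 1) ^ (f + 1) + g) ((no, cam ++ [no]) :: rest) vis exp
                = runB grafo destino k rest vis' exp') := by
      intro vis cam exp no b vis' cam' exp' h rest g
      have hfuel : (pvAdjSum grafo + 1) ^ (f + 1) + g = ((pvAdjSum grafo + 1) ^ (f + 1) + g - 1) + 1 := by omega
      rw [dfsA_succ] at h
      by_cases hc : PySem.Set.contains vis no = true
      · rw [if_pos hc] at h
        simp only [Option.some.injEq, Prod.mk.injEq] at h
        obtain ⟨hb, hv, hcam, hexp⟩ := h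
        constructor
        · intro hbt; rw [← hb] at hbt; cases hbt
        · intro _
          refine ⟨(pvAdjSum grafo + 1) ^ (f + 1) + g - 1, by omega, ?_⟩
          rw [hfuel, runB_cons, if_pos hc, hv, hexp]
          simp
      · rw [if_neg hc] at h
        by_cases hd : no = destino
        · rw [if_pos hd] at h
          simp only [Option.some.injEq, Prod.mk.injEq] at h
          obtain ⟨hb, hv, hcam, hexp⟩ := h
          constructor
          · intro _
            rw [hfuel, runB_cons, if_neg hc, if_pos hd, hcam, hexp]
          · intro hbf; rw [← hb] at hbf; cases hbf
        · rw [if_neg hd] at h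
          cases hl : dfsALoop grafo destino f (PySem.Set.add vis no) (cam ++ [no]) (exp ++ [no]) (pvAdj grafo no) with
          | none => rw [hl] at h; cases h
          | some out =>
            obtain ⟨b2, vis2, cam2, exp2⟩ := out
            rw [hl] at h
            -- fuel arithmetic
            have hPpos : 1 ≤ (pvAdjSum grafo + 1) ^ f := Nat.one_le_pow _ _ (by omega)
            have hadj : (pvAdj grafo no).length ≤ pvAdjSum grafo := pvAdj_len grafo no
            have hmul : (pvAdj grafo no).length * (pvAdjSum grafo + 1) ^ f
                ≤ pvAdjSum grafo * (pvAdjSum grafo + 1) ^ f :=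
              Nat.mul_le_mul_right _ hadj
            have hpow : (pvAdjSum grafo + 1) ^ (f + 1)
                = pvAdjSum grafo * (pvAdjSum grafo + 1) ^ f + (pvAdjSum grafo + 1) ^ f := by
              rw [pow_succ]; ring
            have hg2 : g ≤ (pvAdjSum grafo + 1) ^ (f + 1) + g - 1 - (pvAdj grafo no).length * (pvAdjSum grafo + 1) ^ f
                ∧ (pvAdjSum grafo + 1) ^ (f + 1) + g - 1
                  = (pvAdj grafo no).length * (pvAdjSum grafo + 1) ^ f
                    + ((pvAdjSum grafo + 1) ^ (f + 1) + g - 1 - (pvAdj grafo no).length * (pvAdjSum grafo + 1) ^ f) := by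
              omega
            have hstep : runB grafo destino ((pvAdjSum grafo + 1) ^ (f + 1) + g) ((no, cam ++ [no]) :: rest) vis exp
                = runB grafo destino ((pvAdjSum grafo + 1) ^ (f + 1) + g - 1)
                    ((pvAdj grafo no).map (fun v => (v.1, (cam ++ [no]) ++ [v.1])) ++ rest)
                    (PySem.Set.add vis no) (exp ++ [no]) := by
              rw [hfuel, runB_cons, if_neg hc, if_neg hd]
              simp
            cases b2
            · -- inner loop failed
              simp only [Option.some.injEq, Prod.mk.injEq] at h
              obtain ⟨hb, hv, hcam, hexp⟩ := h
              constructor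
              · intro hbt; rw [← hb] at hbt; cases hbt
              · intro _
                obtain ⟨k, hk, hrun⟩ := ((ih.2 (pvAdj grafo no) (PySem.Set.add vis no) (cam ++ [no]) (exp ++ [no])
                  false vis2 cam2 exp2 hl) rest
                  ((pvAdjSum grafo + 1) ^ (f + 1) + g - 1 - (pvAdj grafo no).length * (pvAdjSum grafo + 1) ^ f)).2 rfl
                refine ⟨k, by omega, ?_⟩
                rw [hstep, hg2.2, hrun, hv, hexp]
            · -- inner loop succeeded
              simp only [Option.some.injEq, Prod.mk.injEq] at h
              obtain ⟨hb, hv, hcam, hexp⟩ := h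
              constructor
              · intro _
                have hrun := ((ih.2 (pvAdj grafo no) (PySem.Set.add vis no) (cam ++ [no]) (exp ++ [no])
                  true vis2 cam2 exp2 hl) rest
                  ((pvAdjSum grafo + 1) ^ (f + 1) + g - 1 - (pvAdj grafo no).length * (pvAdjSum grafo + 1) ^ f)).1 rfl
                rw [hstep, hg2.2, hrun, hcam, hexp]
              · intro hbf; rw [← hb] at hbf; cases hbf
    refine ⟨hnode, ?_⟩
    intro ns
    induction ns with
    | nil =>
      intro vis cam exp b vis' cam' exp' h rest g
      rw [dfsALoop_nil] at h
      simp only [Option.some.injEq, Prod.mk.injEq] at h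
      obtain ⟨hb, hv, hcam, hexp⟩ := h
      constructor
      · intro hbt; rw [← hb] at hbt; cases hbt
      · intro _
        refine ⟨g, le_refl g, ?_⟩
        simp [hv, hexp]
    | cons v restNs ihr =>
      intro vis cam exp b vis' cam' exp' h rest g
      rw [dfsALoop_cons] at h
      cases h0 : dfsA grafo destino (f + 1) vis cam exp v.1 with
      | none => rw [h0] at h; cases h
      | some out0 =>
        obtain ⟨b0, vis0, cam0, exp0⟩ := out0
        rw [h0] at h
        have hfuel : (v :: restNs).length * (pvAdjSum grafo + 1) ^ (f + 1) + g
            = (pvAdjSum grafo + 1) ^ (f + 1) + (restNs.length * (pvAdjSum grafo + 1) ^ (f + 1) + g) := by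
          simp only [List.length_cons]; ring
        have hstack : ((v :: restNs).map (fun w => (w.1, cam ++ [w.1])) ++ rest)
            = (v.1, cam ++ [v.1]) :: (restNs.map (fun w => (w.1, cam ++ [w.1])) ++ rest) := by
          simp
        cases b0
        · -- first child failed, loop continues
          have hcam0 : cam0 = cam := (pv_restore grafo destino (f + 1)).1 _ _ _ _ _ _ _ h0
          obtain ⟨k, hk, hrun⟩ := (hnode vis cam exp v.1 false vis0 cam0 exp0 h0
            (restNs.map (fun w => (w.1, cam ++ [w.1])) ++ rest)
            (restNs.length * (pvAdjSum grafo + 1) ^ (f + 1) + g)).2 rfl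
          have hk2 : k = restNs.length * (pvAdjSum grafo + 1) ^ (f + 1)
              + (k - restNs.length * (pvAdjSum grafo + 1) ^ (f + 1)) := by omega
          have hrest := ihr vis0 cam0 exp0 b vis' cam' exp' h rest
            (k - restNs.length * (pvAdjSum grafo + 1) ^ (f + 1))
          rw [hcam0] at hrest
          constructor
          · intro hbt
            rw [hfuel, hstack, hrun, hk2]
            exact hrest.1 hbt
          · intro hbf
            obtain ⟨k2, hk2le, hrun2⟩ := hrest.2 hbf
            refine ⟨k2, by omega, ?_⟩
            rw [hfuel, hstack, hrun, hk2, hrun2]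
        · -- first child found destino
          simp only [Option.some.injEq, Prod.mk.injEq] at h
          obtain ⟨hb, hv, hcam, hexp⟩ := h
          constructor
          · intro _
            have hrun := (hnode vis cam exp v.1 true vis0 cam0 exp0 h0
              (restNs.map (fun w => (w.1, cam ++ [w.1])) ++ rest)
              (restNs.length * (pvAdjSum grafo + 1) ^ (f + 1) + g)).1 rfl
            rw [hfuel, hstack, hrun, hcam, hexp]
          · intro hbf; rw [← hb] at hbf; cases hbf

-- ===== VERDICT (by name: the statement is the Claim_ definition above) =====
theorem procura_profundidade_spec : Claim_equal_procura_profundidade := by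
  intro grafo inicial destino _
  unfold Spec_procura_profundidade
  have hcnt : pvCount (pvAllNodes grafo inicial) PySem.Set.empty
      < (pvAllNodes grafo inicial).length + 1 := by
    have := List.length_filter_le (fun n => !PySem.Set.contains PySem.Set.empty n) (pvAllNodes grafo inicial)
    unfold pvCount
    omega
  obtain ⟨b, vis', cam', exp', hA, _⟩ :=
    (pv_suff grafo destino inicial ((pvAllNodes grafo inicial).length + 1)).1
      PySem.Set.empty [] [] inicial List.mem_cons_self hcnt
  have hbr := (pv_bridge grafo destino ((pvAllNodes grafo inicial).length + 1)).1
    PySem.Set.empty [] [] inicial b vis' cam' exp' hA [] 1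
  unfold procura_profundidade procura_profundidade_alt
  rw [hA]
  cases b
  · -- destino not reached: both return ([], expansion order)
    have hcam : cam' = [] :=
      (pv_restore grafo destino ((pvAllNodes grafo inicial).length + 1)).1 _ _ _ _ _ _ _ hA
    obtain ⟨k, hk, hrun⟩ := hbr.2 rfl
    simp only [List.nil_append] at hrun
    rw [hrun]
    have hk1 : k = (k - 1) + 1 := by omega
    rw [hk1, runB_nil, hcam]
  · -- destino reached: both return (path, expansion order)
    have hrun := hbr.1 rfl
    simp only [List.nil_append] at hrun
    rw [hrun]
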